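-- pv_equiv track=rewrite | github.com/woosflex/nuqr_featurizer | benches/python_morphology_baseline.py | binary_erosion_4
-- ===== SOURCE A (Python) =====
-- def binary_erosion_4(mask):
--     h = len(mask)
--     w = len(mask[0])
--     eroded = [[False for _ in range(w)] for _ in range(h)]
--     if h < 3 or w < 3:
--         return eroded
--     for r in range(1, h - 1):
--         for c in range(1, w - 1):
--             eroded[r][c] = (
--                 mask[r][c]
--                 and mask[r - 1][c]
--                 and mask[r + 1][c]
--                 and mask[r][c - 1]
--                 and mask[r][c + 1]
--             )
--     return eroded
-- ===== SOURCE B (Python) =====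
-- def binary_erosion_4(mask):
--     h = len(mask)
--     w = len(mask[0])
--     # seed: interior cells copy the centre value, everything else is False
--     eroded = [
--         [mask[r][c] if 0 < r < h - 1 and 0 < c < w - 1 else False for c in range(w)]
--         for r in range(h)
--     ]
--     if h < 3 or w < 3:
--         return eroded
--     # four directional shift-and-AND passes: up, down, left, right
--     for dr, dc in ((-1, 0), (1, 0), (0, -1), (0, 1)):
--         for r in range(1, h - 1):
--             for c in range(1, w - 1):
--                 eroded[r][c] = eroded[r][c] and mask[r + dr][c + dc]
--     return eroded
-- ===== Notes on version B (the rewrite author's own statement) =====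
-- stated objective: alternative
-- what changed: B replaces A's single five-way neighbour gather per cell by a comprehension-built seed grid (interior = centre value) followed by four directional shift-and-AND passes (up, down, left, right), the standard separable-morphology decomposition.
import Mathlib
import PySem

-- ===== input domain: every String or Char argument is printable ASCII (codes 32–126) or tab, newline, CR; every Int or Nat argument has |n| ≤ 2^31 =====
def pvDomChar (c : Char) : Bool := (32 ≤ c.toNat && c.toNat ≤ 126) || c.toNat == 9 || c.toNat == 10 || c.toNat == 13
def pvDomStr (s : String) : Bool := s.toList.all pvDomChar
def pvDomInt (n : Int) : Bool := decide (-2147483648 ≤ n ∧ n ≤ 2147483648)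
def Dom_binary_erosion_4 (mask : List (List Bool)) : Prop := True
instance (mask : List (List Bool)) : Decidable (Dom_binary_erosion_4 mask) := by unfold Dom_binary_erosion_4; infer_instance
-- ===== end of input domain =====

-- B replaces A's single five-way gather per interior cell by a seed pass plus four
-- directional shift-and-AND passes (alternative decomposition, same cost).

-- shared port helper: eroded[r][c] = v  (Python assignment into a list-of-lists grid)
def pvSetCell (g : List (List Bool)) (r c : Nat) (v : Bool) : List (List Bool) :=
  g.set r ((g.getD r []).set c v)

-- shared port helper: eroded[r][c] / mask[r][c] read (indices in range under Pre_)
def pvCell (g : List (List Bool)) (r c : Nat) : Bool :=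
  (g.getD r []).getD c false

-- ===== PORT A =====
def binary_erosion_4 (mask : List (List Bool)) : List (List Bool) :=
  let h := mask.length
  let w := (mask.headD []).length
  let eroded := (List.range h).map (fun _ => (List.range w).map (fun _ => false))
  if h < 3 ∨ w < 3 then eroded
  else
    (List.range' 1 (h - 2)).foldl (fun er r =>
      (List.range' 1 (w - 2)).foldl (fun er c =>
        pvSetCell er r c
          (pvCell mask r c && pvCell mask (r - 1) c && pvCell mask (r + 1) c &&
            pvCell mask r (c - 1) && pvCell mask r (c + 1))) er) eroded

-- ===== PORT B =====
-- one directional pass: eroded[r][c] = eroded[r][c] and mask[r+dr][c+dc] over the interior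
def pvPass (mask : List (List Bool)) (h w : Nat) (er : List (List Bool)) (d : Int × Int) :
    List (List Bool) :=
  (List.range' 1 (h - 2)).foldl (fun er r =>
    (List.range' 1 (w - 2)).foldl (fun er c =>
      pvSetCell er r c
        (pvCell er r c && pvCell mask ((r : Int) + d.1).toNat ((c : Int) + d.2).toNat)) er) er

def binary_erosion_4_alt (mask : List (List Bool)) : List (List Bool) :=
  let h := mask.length
  let w := (mask.headD []).length
  let eroded := (List.range h).map (fun r => (List.range w).map (fun c =>
    if 0 < r ∧ r < h - 1 ∧ (0 < c ∧ c < w - 1) then pvCell mask r c else false))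
  if h < 3 ∨ w < 3 then eroded
  else
    ([((-1 : Int), (0 : Int)), (1, 0), (0, -1), (0, 1)]).foldl (pvPass mask h w) eroded

-- ===== PRECONDITION & SPEC =====
-- Pre_ excludes the empty mask (Python A raises IndexError on mask[0]) and, when the interior
-- loop runs (both dimensions ≥ 3), ragged masks: on those A either raises or returns only
-- because `and` short-circuiting skips the out-of-range reads — an accident of evaluation
-- order that B happens to reproduce anyway.
def Pre_binary_erosion_4 (mask : List (List Bool)) : Prop :=
  mask ≠ [] ∧ (3 ≤ mask.length → 3 ≤ (mask.headD []).length →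
    ∀ row ∈ mask, row.length = (mask.headD []).length)
instance (mask : List (List Bool)) : Decidable (Pre_binary_erosion_4 mask) := by
  unfold Pre_binary_erosion_4; infer_instance

def pvWitness_binary_erosion_4 : List (List Bool) :=
  [[true, true, true], [true, true, true], [true, false, true]]

def Spec_binary_erosion_4 (mask : List (List Bool)) (out : List (List Bool)) : Prop := out = binary_erosion_4_alt mask
instance (mask : List (List Bool)) (out : List (List Bool)) : Decidable (Spec_binary_erosion_4 mask out) := by unfold Spec_binary_erosion_4; infer_instance

-- ===== CLAIM (what is proved, stated in full; the proofs are below) =====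
def Claim_equal_binary_erosion_4 : Prop := ∀ (mask : List (List Bool)), Dom_binary_erosion_4 mask → Pre_binary_erosion_4 mask → Spec_binary_erosion_4 mask (binary_erosion_4 mask)

-- ===== LEMMAS AND PROOFS =====

-- inner loop over one row: each index set once (the index list is nodup), so entry j becomes
-- f j (old value) when j is in the list and in range, and is unchanged otherwise
theorem rowfold_getD (l : List Nat) (f : Nat → Bool → Bool) (row : List Bool)
    (hnd : l.Nodup) (hb : ∀ c ∈ l, c < row.length) (j : Nat) :
    (l.foldl (fun row c => row.set c (f c (row.getD c false))) row).getD j false =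
      if j ∈ l then f j (row.getD j false) else row.getD j false := by
  induction l generalizing row with
  | nil => simp
  | cons c cs ih =>
    have hc : c < row.length := hb c (List.mem_cons_self)
    have hnd' := hnd.of_cons
    have hcn : c ∉ cs := (List.nodup_cons.mp hnd).1
    simp only [List.foldl_cons]
    rw [ih _ hnd' (by intro x hx; simpa using hb x (List.mem_cons_of_mem _ hx))]
    by_cases hj : j ∈ cs
    · have hjc : j ≠ c := fun h => hcn (h ▸ hj)
      simp [hj, hjc, List.mem_cons, List.getD_eq_getElem?_getD, List.getElem?_set_ne (Ne.symm hjc)]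
    · by_cases hjc : j = c
      · subst hjc
        simp [hj, List.getD_eq_getElem?_getD, hc]
      · simp [hj, hjc, List.mem_cons, List.getD_eq_getElem?_getD,
          List.getElem?_set_ne (fun h => hjc h.symm)]

theorem rowfold_length (l : List Nat) (f : Nat → Bool → Bool) (row : List Bool) :
    (l.foldl (fun row c => row.set c (f c (row.getD c false))) row).length = row.length := by
  induction l generalizing row with
  | nil => rfl
  | cons c cs ih => simp only [List.foldl_cons]; rw [ih]; simp

-- the inner loop of both ports, written with pvSetCell/pvCell, only rewrites row r
theorem innerfold_eq_set (cl : List Nat) (g : Nat → Nat → Bool → Bool) (er : List (List Bool))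
    (r : Nat) (hr : r < er.length) :
    (cl.foldl (fun er c => pvSetCell er r c (g r c (pvCell er r c))) er) =
      er.set r (cl.foldl (fun row c => row.set c (g r c (row.getD c false))) (er.getD r [])) := by
  induction cl generalizing er with
  | nil =>
    simp only [List.foldl_nil, List.getD_eq_getElem?_getD]
    rw [List.getElem?_eq_getElem hr]
    simp [List.set_getElem_self]
  | cons c cs ih =>
    simp only [List.foldl_cons]
    rw [ih _ (by simpa [pvSetCell] using hr)]
    simp [pvSetCell, pvCell, List.getD_eq_getElem?_getD, hr, List.set_set]

-- row update inside a grid: reading back the set row / an untouched row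
theorem getD_set_self (er : List (List Bool)) (r : Nat) (x : List Bool) (hr : r < er.length) :
    (er.set r x).getD r [] = x := by
  simp [List.getD_eq_getElem?_getD, hr]

theorem getD_set_ne (er : List (List Bool)) (r i : Nat) (x : List Bool) (h : i ≠ r) :
    (er.set r x).getD i [] = er.getD i [] := by
  simp [List.getD_eq_getElem?_getD, List.getElem?_set_ne (Ne.symm h)]

-- grid-level characterisation of one interior pass
theorem gridfold_getD (rl cl : List Nat) (g : Nat → Nat → Bool → Bool) (er : List (List Bool))
    (hrnd : rl.Nodup) (hcnd : cl.Nodup)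
    (hrb : ∀ r ∈ rl, r < er.length) (hcb : ∀ r ∈ rl, ∀ c ∈ cl, c < (er.getD r []).length)
    (i j : Nat) :
    pvCell (rl.foldl (fun er r =>
        cl.foldl (fun er c => pvSetCell er r c (g r c (pvCell er r c))) er) er) i j =
      if i ∈ rl ∧ j ∈ cl then g i j (pvCell er i j) else pvCell er i j := by
  induction rl generalizing er with
  | nil => simp
  | cons r rs ih =>
    have hr : r < er.length := hrb r (List.mem_cons_self)
    have hrn : r ∉ rs := (List.nodup_cons.mp hrnd).1
    simp only [List.foldl_cons]
    rw [innerfold_eq_set cl g er r hr]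
    have hlen : ∀ i', ((er.set r (cl.foldl (fun row c => row.set c (g r c (row.getD c false)))
        (er.getD r []))).getD i' []).length = (er.getD i' []).length := by
      intro i'
      by_cases hir : i' = r
      · rw [hir, getD_set_self _ _ _ hr, rowfold_length]
      · rw [getD_set_ne _ _ _ _ hir]
    rw [ih _ hrnd.of_cons (by intro x hx; simpa using hrb x (List.mem_cons_of_mem _ hx))
      (by intro x hx c hc; rw [hlen]; exact hcb x (List.mem_cons_of_mem _ hx) c hc)]
    have hcell : ∀ i' j', pvCell (er.set r (cl.foldl
        (fun row c => row.set c (g r c (row.getD c false))) (er.getD r []))) i' j' =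
        if i' = r ∧ j' ∈ cl then g r j' (pvCell er r j') else pvCell er i' j' := by
      intro i' j'
      by_cases hir : i' = r
      · rw [hir, pvCell, getD_set_self _ _ _ hr,
          rowfold_getD cl (g r) _ hcnd (hcb r List.mem_cons_self) j']
        simp [pvCell]
      · rw [pvCell, getD_set_ne _ _ _ _ hir]
        simp [hir, pvCell]
    by_cases hi : i ∈ rs
    · have hir : i ≠ r := fun h => hrn (h ▸ hi)
      rw [hcell i j]
      simp [hi, hir, List.mem_cons]
    · rw [hcell i j]
      by_cases hir : i = r
      · subst hir
        simp [hi, List.mem_cons]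
      · simp [hi, hir, List.mem_cons]

-- grid-level length/shape preservation for one interior pass
theorem gridfold_length (rl cl : List Nat) (g : List (List Bool) → Nat → Nat → Bool)
    (er : List (List Bool)) :
    (rl.foldl (fun er r =>
        cl.foldl (fun er c => pvSetCell er r c (g er r c)) er) er).length =
      er.length := by
  induction rl generalizing er with
  | nil => rfl
  | cons r rs ih =>
    simp only [List.foldl_cons]
    rw [ih]
    clear ih
    induction cl generalizing er with
    | nil => rfl
    | cons c cs ih2 => simp only [List.foldl_cons]; rw [ih2]; simp [pvSetCell]

theorem gridfold_rowlen (rl cl : List Nat) (g : List (List Bool) → Nat → Nat → Bool)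
    (er : List (List Bool)) (i : Nat) :
    ((rl.foldl (fun er r =>
        cl.foldl (fun er c => pvSetCell er r c (g er r c)) er) er).getD i []).length =
      (er.getD i []).length := by
  induction rl generalizing er with
  | nil => rfl
  | cons r rs ih =>
    simp only [List.foldl_cons]
    rw [ih]
    clear ih
    induction cl generalizing er with
    | nil => rfl
    | cons c cs ih2 =>
      simp only [List.foldl_cons]
      rw [ih2]
      by_cases hir : i = r
      · subst hir
        by_cases hr : i < er.length
        · simp [pvSetCell, List.getD_eq_getElem?_getD, hr]
        · rw [pvSetCell, List.set_eq_of_length_le (by omega)]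
      · simp [pvSetCell, List.getD_eq_getElem?_getD, List.getElem?_set_ne (fun h => hir h.symm)]

-- cells of the all-False starting grid (any index, in or out of range)
theorem zeros_cell (h w i j : Nat) :
    pvCell ((List.range h).map (fun _ => (List.range w).map (fun _ => false))) i j = false := by
  unfold pvCell
  by_cases hi : i < h
  · simp [List.getD_eq_getElem?_getD, hi]
  · have hrow : ((List.range h).map (fun _ => (List.range w).map (fun _ => false))).getD i []
        = [] := by
      rw [List.getD_eq_getElem?_getD, List.getElem?_eq_none_iff.mpr (by simpa using hi)]
      rfl
    rw [hrow]
    rfl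

-- shape of a grid: outer length and the length of every row in range
def pvShape (g : List (List Bool)) (H W : Nat) : Prop :=
  g.length = H ∧ ∀ i, i < H → (g.getD i []).length = W

theorem zeros_shape (h w : Nat) :
    pvShape ((List.range h).map (fun _ => (List.range w).map (fun _ => false))) h w := by
  constructor
  · simp
  · intro i hi
    simp [List.getD_eq_getElem?_getD, hi]

-- two grids agreeing in shape and in every cell are equal
theorem grid_eq_of_cell (g1 g2 : List (List Bool)) (hl : g1.length = g2.length)
    (hrl : ∀ i, i < g1.length → (g1.getD i []).length = (g2.getD i []).length)
    (hc : ∀ i j, pvCell g1 i j = pvCell g2 i j) : g1 = g2 := by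
  apply List.ext_getElem hl
  intro i hi1 hi2
  have e1 : g1[i] = g1.getD i [] := (List.getD_eq_getElem g1 [] hi1).symm
  have e2 : g2[i] = g2.getD i [] := (List.getD_eq_getElem g2 [] hi2).symm
  have hlen : g1[i].length = g2[i].length := by rw [e1, e2]; exact hrl i hi1
  apply List.ext_getElem hlen
  intro j hj1 hj2
  have f1 : g1[i][j] = pvCell g1 i j := by
    rw [pvCell, ← e1, List.getD_eq_getElem _ _ hj1]
  have f2 : g2[i][j] = pvCell g2 i j := by
    rw [pvCell, ← e2, List.getD_eq_getElem _ _ hj2]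
  rw [f1, f2, hc]

-- cells and shape of B's comprehension-built seed grid (any index, in or out of range)
theorem seed_cell (mask : List (List Bool)) (h w i j : Nat) :
    pvCell ((List.range h).map (fun r => (List.range w).map (fun c =>
        if 0 < r ∧ r < h - 1 ∧ (0 < c ∧ c < w - 1) then pvCell mask r c else false))) i j =
      if 0 < i ∧ i < h - 1 ∧ (0 < j ∧ j < w - 1) then pvCell mask i j else false := by
  by_cases hi : i < h
  · by_cases hj : j < w
    · simp [pvCell, List.getD_eq_getElem?_getD, hi, hj]
    · have hcond : ¬(0 < i ∧ i < h - 1 ∧ (0 < j ∧ j < w - 1)) := by omega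
      rw [if_neg hcond]
      unfold pvCell
      exact List.getD_eq_default _ false
        (by simp [List.getD_eq_getElem?_getD, hi]; omega)
  · have hcond : ¬(0 < i ∧ i < h - 1 ∧ (0 < j ∧ j < w - 1)) := by omega
    rw [if_neg hcond]
    unfold pvCell
    rw [List.getD_eq_default _ [] (by simp; omega)]
    rfl

theorem seed_shape (mask : List (List Bool)) (h w : Nat) :
    pvShape ((List.range h).map (fun r => (List.range w).map (fun c =>
        if 0 < r ∧ r < h - 1 ∧ (0 < c ∧ c < w - 1) then pvCell mask r c else false))) h w := by
  constructor
  · simp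
  · intro i hi
    simp [List.getD_eq_getElem?_getD, hi]

-- the interior fill loop shared by both ports (A's gather, B's seed pass), characterised
theorem pvFill_step (H W : Nat) (q : Nat → Nat → Bool) :
    pvShape ((List.range' 1 (H - 2)).foldl (fun er r =>
        (List.range' 1 (W - 2)).foldl (fun er c => pvSetCell er r c (q r c)) er)
        ((List.range H).map (fun _ => (List.range W).map (fun _ => false)))) H W ∧
      ∀ i j, pvCell ((List.range' 1 (H - 2)).foldl (fun er r =>
        (List.range' 1 (W - 2)).foldl (fun er c => pvSetCell er r c (q r c)) er)
        ((List.range H).map (fun _ => (List.range W).map (fun _ => false)))) i j =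
        if i ∈ List.range' 1 (H - 2) ∧ j ∈ List.range' 1 (W - 2) then q i j else false := by
  have hz := zeros_shape H W
  constructor
  · constructor
    · rw [gridfold_length]; exact hz.1
    · intro i hi
      rw [gridfold_rowlen]; exact hz.2 i hi
  · intro i j
    have h0 := gridfold_getD (List.range' 1 (H - 2)) (List.range' 1 (W - 2))
      (fun r c _ => q r c)
      ((List.range H).map (fun _ => (List.range W).map (fun _ => false)))
      List.nodup_range' List.nodup_range'
      (by intro r hr; rw [hz.1]; have := List.mem_range'_1.mp hr; omega)
      (by intro r hr c hc
          rw [hz.2 r (by have := List.mem_range'_1.mp hr; omega)]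
          have := List.mem_range'_1.mp hc; omega) i j
    simp only [] at h0
    rw [h0, zeros_cell]

-- one directional pass of B, characterised against the previous pass
theorem pvPass_step (mask er : List (List Bool)) (H W : Nat) (d : Int × Int)
    (f : Nat → Nat → Bool) (hs : pvShape er H W)
    (hc : ∀ i j, pvCell er i j =
      if i ∈ List.range' 1 (H - 2) ∧ j ∈ List.range' 1 (W - 2) then f i j else false) :
    pvShape (pvPass mask H W er d) H W ∧
      ∀ i j, pvCell (pvPass mask H W er d) i j =
        if i ∈ List.range' 1 (H - 2) ∧ j ∈ List.range' 1 (W - 2) then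
          f i j && pvCell mask ((i : Int) + d.1).toNat ((j : Int) + d.2).toNat else false := by
  constructor
  · constructor
    · rw [pvPass, gridfold_length]; exact hs.1
    · intro i hi
      rw [pvPass, gridfold_rowlen]; exact hs.2 i hi
  · intro i j
    have h0 := gridfold_getD (List.range' 1 (H - 2)) (List.range' 1 (W - 2))
      (fun r c v => v && pvCell mask ((r : Int) + d.1).toNat ((c : Int) + d.2).toNat) er
      List.nodup_range' List.nodup_range'
      (by intro r hr; rw [hs.1]; have := List.mem_range'_1.mp hr; omega)
      (by intro r hr c hc'
          rw [hs.2 r (by have := List.mem_range'_1.mp hr; omega)]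
          have := List.mem_range'_1.mp hc'; omega) i j
    simp only [] at h0
    rw [pvPass, h0, hc]
    by_cases hij : i ∈ List.range' 1 (H - 2) ∧ j ∈ List.range' 1 (W - 2)
    · simp only [if_pos hij]
    · simp only [if_neg hij]

-- ===== VERDICT (by name: the statement is the Claim_ definition above) =====
theorem binary_erosion_4_spec : Claim_equal_binary_erosion_4 := by
  intro mask _ _
  unfold Spec_binary_erosion_4
  simp only [binary_erosion_4, binary_erosion_4_alt]
  split_ifs with hlt
  · -- degenerate sizes: every cell of either grid is False
    apply grid_eq_of_cell
    · simp
    · intro i hi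
      simp only [List.length_map, List.length_range] at hi
      simp [List.getD_eq_getElem?_getD, hi]
    · intro i j
      rw [zeros_cell, seed_cell]
      have hcond : ¬(0 < i ∧ i < mask.length - 1 ∧
          (0 < j ∧ j < (mask.headD []).length - 1)) := by omega
      rw [if_neg hcond]
  · have hH : 3 ≤ mask.length := by omega
    have hW : 3 ≤ (mask.headD []).length := by omega
    have hA := pvFill_step mask.length (mask.headD []).length
      (fun r c => pvCell mask r c && pvCell mask (r - 1) c && pvCell mask (r + 1) c &&
        pvCell mask r (c - 1) && pvCell mask r (c + 1))
    simp only [] at hA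
    have hS : ∀ i j, pvCell ((List.range mask.length).map (fun r =>
        (List.range (mask.headD []).length).map (fun c =>
          if 0 < r ∧ r < mask.length - 1 ∧ (0 < c ∧ c < (mask.headD []).length - 1) then
            pvCell mask r c else false))) i j =
        if i ∈ List.range' 1 (mask.length - 2) ∧
            j ∈ List.range' 1 ((mask.headD []).length - 2) then pvCell mask i j else false := by
      intro i j
      rw [seed_cell]
      exact if_congr (by simp only [List.mem_range'_1]; omega) rfl rfl
    simp only [List.foldl_cons, List.foldl_nil]
    have h1 := pvPass_step mask _ mask.length (mask.headD []).length ((-1 : Int), (0 : Int))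
      _ (seed_shape mask mask.length (mask.headD []).length) hS
    have h2 := pvPass_step mask _ mask.length (mask.headD []).length ((1 : Int), (0 : Int))
      _ h1.1 h1.2
    have h3 := pvPass_step mask _ mask.length (mask.headD []).length ((0 : Int), (-1 : Int))
      _ h2.1 h2.2
    have h4 := pvPass_step mask _ mask.length (mask.headD []).length ((0 : Int), (1 : Int))
      _ h3.1 h3.2
    apply grid_eq_of_cell
    · rw [hA.1.1, h4.1.1]
    · intro i hi
      rw [hA.1.1] at hi
      rw [hA.1.2 i hi, h4.1.2 i hi]
    · intro i j
      rw [hA.2 i j, h4.2 i j]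
      by_cases hij : i ∈ List.range' 1 (mask.length - 2) ∧
          j ∈ List.range' 1 ((mask.headD []).length - 2)
      · have hi1 : 1 ≤ i := (List.mem_range'_1.mp hij.1).1
        have hj1 : 1 ≤ j := (List.mem_range'_1.mp hij.2).1
        have e1 : ((i : Int) + -1).toNat = i - 1 := by omega
        have e2 : ((i : Int) + 1).toNat = i + 1 := by omega
        have e4 : ((j : Int) + -1).toNat = j - 1 := by omega
        have e5 : ((j : Int) + 1).toNat = j + 1 := by omega
        simp [hij, e1, e2, e4, e5]
      · simp only [if_neg hij]
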